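-- pv_equiv track=rewrite | github.com/BigOasis/Python | JiaBae/Week11/PGS_64064_불량사용자.py | solution
-- ===== SOURCE A (Python) =====
-- def solution(user_id, banned_id):
--     # 패턴 매칭 함수
--     def match(u, p) -> bool:
--         if len(u) != len(p):
--             return False
--         return all(pb == '*' or ub == pb for ub, pb in zip(u, p))
--
--     # 각 불량 패턴별 후보 user 목록 미리 계산
--     candidates = [[u for u in user_id if match(u, p)] for p in banned_id]
--
--     # (선택지 줄이기용)
--     candidates.sort(key=len)
--
--     used = set()             # 이미 사용한 user 아이디
--     results = set()          # frozenset로 중복 제거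
--
--     def dfs(i, picked):
--         if i == len(candidates):
--             results.add(frozenset(picked))  # 순서 무시를 위해 frozenset 사용
--             return
--         for u in candidates[i]:
--             if u in used:
--                 continue
--             used.add(u)
--             picked.append(u)
--             dfs(i + 1, picked)
--             picked.pop()
--             used.remove(u)
--
--     dfs(0, [])
--     return len(results)
-- ===== SOURCE B (Python) =====
-- def solution(user_id, banned_id):
--     def match(u, p) -> bool:
--         if len(u) != len(p):
--             return False
--         return all(pb == '*' or ub == pb for ub, pb in zip(u, p))
--
--     candidates = [[u for u in user_id if match(u, p)] for p in banned_id]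
--
--     # breadth-first over the patterns: the set of distinct partial assignments,
--     # deduplicated as frozensets at every level
--     sets = {frozenset()}
--     for c in candidates:
--         sets = {s | {u} for s in sets for u in c if u not in s}
--     return len(sets)
-- ===== Notes on version B (the rewrite author's own statement) =====
-- stated objective: simpler
-- what changed: Replaces A's depth-first backtracking (mutable used-set and picked stack over length-sorted candidate lists, deduplicating only the complete assignments) with a breadth-first sweep over the patterns that keeps one set of distinct partial frozensets per level, deduplicating at every level.
import Mathlib
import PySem

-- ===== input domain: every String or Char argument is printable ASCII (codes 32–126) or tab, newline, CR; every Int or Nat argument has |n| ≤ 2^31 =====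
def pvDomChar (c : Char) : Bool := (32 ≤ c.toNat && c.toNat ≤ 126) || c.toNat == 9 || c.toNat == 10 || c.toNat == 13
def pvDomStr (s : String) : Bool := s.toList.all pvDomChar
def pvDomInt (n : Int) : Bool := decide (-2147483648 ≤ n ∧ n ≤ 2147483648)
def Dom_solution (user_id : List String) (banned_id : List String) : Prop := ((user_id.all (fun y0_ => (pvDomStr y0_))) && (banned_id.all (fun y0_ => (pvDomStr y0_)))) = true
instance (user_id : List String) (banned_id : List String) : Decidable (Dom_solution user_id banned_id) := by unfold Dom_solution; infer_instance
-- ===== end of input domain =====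

-- B replaces A's recursive backtracking (mutable used-set and picked stack over
-- length-sorted candidate lists) by a breadth-first sweep keeping one deduplicated
-- set of partial frozensets per pattern level; objective: simpler.

-- ===== PORT A =====
-- match(u, p): same length, and each pattern char is '*' or equal
def pvMatch (u p : String) : Bool :=
  if PySem.Str.len u ≠ PySem.Str.len p then false
  else (u.toList.zip p.toList).all (fun up => up.2 == '*' || up.1 == up.2)

-- candidates = [[u for u in user_id if match(u, p)] for p in banned_id]
def pvCandidates (user_id banned_id : List String) : List (List String) :=
  banned_id.map (fun p => user_id.filter (fun u => pvMatch u p))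

-- frozenset(picked): canonical form of a duplicate-free list (sorted, no key)
def pvFrozen (picked : List String) : List String :=
  PySem.List.sorted picked (fun x => x) false

-- dfs(i, picked) with the used-set; results accumulated as a PySem.Set of frozensets
def pvDfs : List (List String) → List String → PySem.Set String → PySem.Set (List String) → PySem.Set (List String)
  | [], picked, _, results => PySem.Set.add results (pvFrozen picked)
  | c :: rest, picked, used, results =>
      c.foldl (fun res u =>
        if PySem.Set.contains used u then res
        else pvDfs rest (picked ++ [u]) (PySem.Set.add used u) res) results
termination_by cs _ _ _ => cs.length
decreasing_by simp

def solution (user_id : List String) (banned_id : List String) : Int :=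
  let candidates := PySem.List.sorted (pvCandidates user_id banned_id) (fun c => c.length) false
  ((pvDfs candidates [] PySem.Set.empty PySem.Set.empty).length : Int)

-- ===== PORT B =====
-- sets = {frozenset()}; for c in candidates: sets = {s | {u} for s in sets for u in c if u not in s}
def pvStep (level : List (List String)) (c : List String) : PySem.Set (List String) :=
  level.foldl (fun acc s =>
    c.foldl (fun acc u =>
      if u ∈ s then acc else PySem.Set.add acc (pvFrozen (s ++ [u]))) acc) PySem.Set.empty

def solution_alt (user_id : List String) (banned_id : List String) : Int :=
  let candidates := pvCandidates user_id banned_id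
  let sets := candidates.foldl pvStep [[]]
  ((sets.length : Nat) : Int)

-- ===== PRECONDITION & SPEC =====
def Spec_solution (user_id : List String) (banned_id : List String) (out : Int) : Prop := out = solution_alt user_id banned_id
instance (user_id : List String) (banned_id : List String) (out : Int) : Decidable (Spec_solution user_id banned_id out) := by unfold Spec_solution; infer_instance

-- ===== CLAIM (what is proved, stated in full; the proofs are below) =====
def Claim_equal_solution : Prop := ∀ (user_id : List String) (banned_id : List String), Dom_solution user_id banned_id → Spec_solution user_id banned_id (solution user_id banned_id)

-- ===== LEMMAS AND PROOFS =====

-- generic membership characterisation for an accumulate-only foldl whose per-step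
-- additions do not depend on the accumulator
theorem pv_foldl_mem_iff {α β : Type} (f : List β → α → List β) (Q : α → β → Prop) :
    ∀ (l : List α), (∀ res a x, a ∈ l → (x ∈ f res a ↔ x ∈ res ∨ Q a x)) →
      ∀ res x, x ∈ l.foldl f res ↔ x ∈ res ∨ ∃ a ∈ l, Q a x := by
  intro l
  induction l with
  | nil => intro _ res x; simp
  | cons a l ih =>
      intro h res x
      simp only [List.foldl_cons]
      rw [ih (fun res b x hb => h res b x (List.mem_cons_of_mem a hb)),
          h res a x (List.mem_cons_self)]
      constructor
      · rintro ((hx | hq) | ⟨b, hb, hq⟩)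
        · exact Or.inl hx
        · exact Or.inr ⟨a, List.mem_cons_self, hq⟩
        · exact Or.inr ⟨b, List.mem_cons_of_mem a hb, hq⟩
      · rintro (hx | ⟨b, hb, hq⟩)
        · exact Or.inl (Or.inl hx)
        · rcases List.mem_cons.mp hb with rfl | hb
          · exact Or.inl (Or.inr hq)
          · exact Or.inr ⟨b, hb, hq⟩

theorem pv_foldl_nodup {α β : Type} (f : List β → α → List β) :
    ∀ (l : List α), (∀ res a, a ∈ l → res.Nodup → (f res a).Nodup) →
      ∀ res, res.Nodup → (l.foldl f res).Nodup := by
  intro l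
  induction l with
  | nil => intro _ res h; simpa using h
  | cons a l ih =>
      intro h res hres
      exact ih (fun res b hb => h res b (List.mem_cons_of_mem a hb))
        (f res a) (h res a List.mem_cons_self hres)

-- frozenset is permutation-invariant
theorem pv_frozen_perm {t t' : List String} (h : t.Perm t') : pvFrozen t = pvFrozen t' := by
  exact PySem.List.sorted_eq_sorted_of_perm t t' (fun x => x) (fun a b hab => hab) h

-- a system of representatives of cs can be rearranged along any permutation of cs
theorem pv_sdr_perm {cs cs' : List (List String)} (h : cs.Perm cs') :
    ∀ t : List String, List.Forall₂ (· ∈ ·) t cs → ∃ t', List.Forall₂ (· ∈ ·) t' cs' ∧ t.Perm t' := by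
  induction h with
  | nil => intro t ht; exact ⟨t, by simpa using ht, List.Perm.refl t⟩
  | cons a _ ih =>
      intro t ht
      rcases List.forall₂_cons_right_iff.mp ht with ⟨u, s, hu, hs, rfl⟩
      rcases ih s hs with ⟨s', hs', hperm⟩
      exact ⟨u :: s', List.Forall₂.cons hu hs', List.Perm.cons u hperm⟩
  | swap a b l =>
      intro t ht
      rcases List.forall₂_cons_right_iff.mp ht with ⟨u, s, hu, hs, rfl⟩
      rcases List.forall₂_cons_right_iff.mp hs with ⟨v, r, hv, hr, rfl⟩
      exact ⟨v :: u :: r, List.Forall₂.cons hv (List.Forall₂.cons hu hr), List.Perm.swap v u r⟩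
  | trans _ _ ih₁ ih₂ =>
      intro t ht
      rcases ih₁ t ht with ⟨t₁, ht₁, hp₁⟩
      rcases ih₂ t₁ ht₁ with ⟨t₂, ht₂, hp₂⟩
      exact ⟨t₂, ht₂, hp₁.trans hp₂⟩

-- membership characterisation of A's dfs
theorem pv_mem_pvDfs :
    ∀ (cs : List (List String)) (picked used : List String) (res : List (List String)) (x : List String),
      x ∈ pvDfs cs picked used res ↔
        x ∈ res ∨ ∃ t, List.Forall₂ (· ∈ ·) t cs ∧ t.Nodup ∧ (∀ u ∈ t, u ∉ used) ∧ x = pvFrozen (picked ++ t) := by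
  intro cs
  induction cs with
  | nil =>
      intro picked used res x
      rw [pvDfs]
      rw [PySem.Set.mem_add]
      constructor
      · rintro (hx | rfl)
        · exact Or.inl hx
        · exact Or.inr ⟨[], List.Forall₂.nil, List.nodup_nil, by simp, by simp⟩
      · rintro (hx | ⟨t, ht, _, _, rfl⟩)
        · exact Or.inl hx
        · rcases List.forall₂_nil_right_iff.mp ht with rfl
          exact Or.inr (by simp)
  | cons c rest ih =>
      intro picked used res x
      rw [pvDfs]
      rw [pv_foldl_mem_iff _
        (fun u x => u ∉ used ∧ ∃ t', List.Forall₂ (· ∈ ·) t' rest ∧ t'.Nodup ∧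
          (∀ v ∈ t', v ∉ used ∧ v ≠ u) ∧ x = pvFrozen (picked ++ u :: t')) c ?_ res x]
      · constructor
        · rintro (hx | ⟨u, hu, hnu, t', hf, hnd, hav, rfl⟩)
          · exact Or.inl hx
          · refine Or.inr ⟨u :: t', List.Forall₂.cons hu hf, ?_, ?_, rfl⟩
            · exact List.nodup_cons.mpr ⟨fun hmem => (hav u hmem).2 rfl, hnd⟩
            · intro v hv
              rcases List.mem_cons.mp hv with rfl | hv
              · exact hnu
              · exact (hav v hv).1
        · rintro (hx | ⟨t, ht, hnd, hav, rfl⟩)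
          · exact Or.inl hx
          · rcases List.forall₂_cons_right_iff.mp ht with ⟨u, t', hu, ht', rfl⟩
            rcases List.nodup_cons.mp hnd with ⟨hut', hnd'⟩
            refine Or.inr ⟨u, hu, hav u List.mem_cons_self, t', ht', hnd', ?_, rfl⟩
            intro v hv
            exact ⟨hav v (List.mem_cons_of_mem u hv), fun hvu => hut' (hvu ▸ hv)⟩
      · intro res' u x' hu
        by_cases hmem : u ∈ used
        · rw [if_pos (PySem.Set.contains_iff used u |>.mpr hmem)]
          constructor
          · exact Or.inl
          · rintro (hx | ⟨hnu, _⟩)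
            · exact hx
            · exact absurd hmem hnu
        · rw [if_neg (fun h => hmem ((PySem.Set.contains_iff used u).mp h))]
          rw [ih (picked ++ [u]) (PySem.Set.add used u) res' x']
          constructor
          · rintro (hx | ⟨t', hf, hnd, hav, rfl⟩)
            · exact Or.inl hx
            · refine Or.inr ⟨hmem, t', hf, hnd, ?_, by simp⟩
              intro v hv
              have := hav v hv
              rw [PySem.Set.mem_add] at this
              push Not at this
              exact this
          · rintro (hx | ⟨hnu, t', hf, hnd, hav, rfl⟩)
            · exact Or.inl hx
            · refine Or.inr ⟨t', hf, hnd, ?_, by simp⟩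
              intro v hv
              rw [PySem.Set.mem_add]
              push Not
              exact hav v hv

theorem pv_nodup_pvDfs :
    ∀ (cs : List (List String)) (picked used : List String) (res : List (List String)),
      res.Nodup → (pvDfs cs picked used res).Nodup := by
  intro cs
  induction cs with
  | nil =>
      intro picked used res hres
      rw [pvDfs]
      exact PySem.Set.nodup_add _ _ hres
  | cons c rest ih =>
      intro picked used res hres
      rw [pvDfs]
      refine pv_foldl_nodup _ c ?_ res hres
      intro res' u _ hres'
      by_cases hmem : u ∈ used
      · rw [if_pos (PySem.Set.contains_iff used u |>.mpr hmem)]; exact hres'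
      · rw [if_neg (fun h => hmem ((PySem.Set.contains_iff used u).mp h))]
        exact ih (picked ++ [u]) (PySem.Set.add used u) res' hres'

-- membership characterisation of one level step of B
theorem pv_mem_pvStep (level : List (List String)) (c : List String) (x : List String) :
    x ∈ pvStep level c ↔ ∃ s ∈ level, ∃ u ∈ c, u ∉ s ∧ x = pvFrozen (s ++ [u]) := by
  unfold pvStep
  rw [pv_foldl_mem_iff _ (fun s x => ∃ u ∈ c, u ∉ s ∧ x = pvFrozen (s ++ [u])) level ?_ PySem.Set.empty x]
  · simp [PySem.Set.empty]
  · intro acc s x' _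
    rw [pv_foldl_mem_iff _ (fun u x => u ∉ s ∧ x = pvFrozen (s ++ [u])) c ?_ acc x']
    intro acc' u x'' _
    by_cases hu : u ∈ s
    · simp [hu]
    · rw [if_neg hu, PySem.Set.mem_add]
      simp [hu]

theorem pv_nodup_pvStep (level : List (List String)) (c : List String) : (pvStep level c).Nodup := by
  unfold pvStep
  refine pv_foldl_nodup _ level ?_ PySem.Set.empty List.nodup_nil
  intro acc s _ hacc
  refine pv_foldl_nodup _ c ?_ acc hacc
  intro acc' u _ hacc'
  by_cases hu : u ∈ s
  · simpa [hu] using hacc'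
  · rw [if_neg hu]; exact PySem.Set.nodup_add _ _ hacc'

-- members of a level step are duplicate-free lists
theorem pv_step_elem_nodup {level : List (List String)} {c : List String}
    (h : ∀ s ∈ level, s.Nodup) : ∀ x ∈ pvStep level c, x.Nodup := by
  intro x hx
  rcases (pv_mem_pvStep level c x).mp hx with ⟨s, hs, u, _, hus, rfl⟩
  have hperm : (pvFrozen (s ++ [u])).Perm (s ++ [u]) :=
    PySem.List.sorted_perm (s ++ [u]) (fun x => x) false
  refine (List.Perm.nodup_iff hperm).mpr ?_
  simp [List.nodup_append, h s hs]
  intro a ha hau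
  exact hus (hau ▸ ha)

-- level members are sorted fixed points (canonical frozensets)
theorem pv_step_elem_canon (level : List (List String)) (c : List String) :
    ∀ x ∈ pvStep level c, pvFrozen x = x := by
  intro x hx
  rcases (pv_mem_pvStep level c x).mp hx with ⟨s, _, u, _, _, rfl⟩
  exact PySem.List.sorted_sorted (s ++ [u]) (fun x => x)

-- membership characterisation of B's level loop
theorem pv_mem_levels :
    ∀ (cs : List (List String)) (level : List (List String)), (∀ s ∈ level, s.Nodup) →
      (∀ s ∈ level, pvFrozen s = s) →
      ∀ x, x ∈ cs.foldl pvStep level ↔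
        ∃ s ∈ level, ∃ t, List.Forall₂ (· ∈ ·) t cs ∧ t.Nodup ∧ (∀ u ∈ t, u ∉ s) ∧ x = pvFrozen (s ++ t) := by
  intro cs
  induction cs with
  | nil =>
      intro level _ hcan x
      simp only [List.foldl_nil]
      constructor
      · intro hx
        exact ⟨x, hx, [], List.Forall₂.nil, List.nodup_nil, by simp,
          by simpa using (hcan x hx).symm⟩
      · rintro ⟨s, hs, t, ht, _, _, rfl⟩
        rcases List.forall₂_nil_right_iff.mp ht with rfl
        simpa [hcan s hs] using hs
  | cons c cs ih =>
      intro level hlev hcan x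
      simp only [List.foldl_cons]
      rw [ih (pvStep level c) (pv_step_elem_nodup hlev) (pv_step_elem_canon level c) x]
      constructor
      · rintro ⟨s', hs', t, ht, hnd, hav, rfl⟩
        rcases (pv_mem_pvStep level c s').mp hs' with ⟨s, hs, u, hu, hus, rfl⟩
        have hperm : (pvFrozen (s ++ [u])).Perm (s ++ [u]) :=
          PySem.List.sorted_perm (s ++ [u]) (fun x => x) false
        refine ⟨s, hs, u :: t, List.Forall₂.cons hu ht, ?_, ?_, ?_⟩
        · refine List.nodup_cons.mpr ⟨fun hut => ?_, hnd⟩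
          exact hav u hut ((List.Perm.mem_iff hperm).mpr (by simp))
        · intro v hv
          rcases List.mem_cons.mp hv with rfl | hv
          · exact hus
          · exact fun hvs => hav v hv ((List.Perm.mem_iff hperm).mpr (by simp [hvs]))
        · have : (pvFrozen (s ++ [u]) ++ t).Perm (s ++ (u :: t)) := by
            simpa using List.Perm.append_right t hperm
          simpa using pv_frozen_perm this
      · rintro ⟨s, hs, t₀, ht₀, hnd, hav, rfl⟩
        rcases List.forall₂_cons_right_iff.mp ht₀ with ⟨u, t, hu, ht, rfl⟩
        rcases List.nodup_cons.mp hnd with ⟨hut, hnd'⟩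
        have hperm : (pvFrozen (s ++ [u])).Perm (s ++ [u]) :=
          PySem.List.sorted_perm (s ++ [u]) (fun x => x) false
        refine ⟨pvFrozen (s ++ [u]),
          (pv_mem_pvStep level c _).mpr ⟨s, hs, u, hu, hav u List.mem_cons_self, rfl⟩,
          t, ht, hnd', ?_, ?_⟩
        · intro v hv hvs
          rcases List.mem_append.mp ((List.Perm.mem_iff hperm).mp hvs) with hvs | hvu
          · exact hav v (List.mem_cons_of_mem u hv) hvs
          · have hveq : v = u := by simpa using hvu
            exact hut (hveq ▸ hv)
        · have : (pvFrozen (s ++ [u]) ++ t).Perm (s ++ (u :: t)) := by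
            simpa using List.Perm.append_right t hperm
          simpa using (pv_frozen_perm this).symm

theorem pv_nodup_levels :
    ∀ (cs : List (List String)) (level : List (List String)), level.Nodup →
      (cs.foldl pvStep level).Nodup := by
  intro cs
  induction cs with
  | nil => intro level h; simpa using h
  | cons c cs ih =>
      intro level _
      simpa using ih (pvStep level c) (pv_nodup_pvStep level c)

-- the two result sets have the same members
theorem pv_same_members (user_id banned_id : List String) (x : List String) :
    x ∈ pvDfs (PySem.List.sorted (pvCandidates user_id banned_id) (fun c => c.length) false)
          [] PySem.Set.empty PySem.Set.empty ↔
      x ∈ (pvCandidates user_id banned_id).foldl pvStep [[]] := by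
  rw [pv_mem_pvDfs, pv_mem_levels _ [[]] (by simp) (by intro s hs; simp only [List.mem_singleton] at hs; subst hs; rfl) x]
  have hperm : (PySem.List.sorted (pvCandidates user_id banned_id) (fun c => c.length) false).Perm
      (pvCandidates user_id banned_id) :=
    PySem.List.sorted_perm (pvCandidates user_id banned_id) (fun c => c.length) false
  constructor
  · rintro (hx | ⟨t, hf, hnd, _, rfl⟩)
    · simp [PySem.Set.empty] at hx
    · rcases pv_sdr_perm hperm t hf with ⟨t', hf', hp⟩
      exact ⟨[], by simp, t', hf', (List.Perm.nodup_iff hp).mp hnd,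
        by simp, by simpa using pv_frozen_perm hp⟩
  · rintro ⟨s, hs, t, ht, hnd, _, rfl⟩
    simp only [List.mem_singleton] at hs
    subst hs
    rcases pv_sdr_perm hperm.symm t ht with ⟨t', hf', hp⟩
    exact Or.inr ⟨t', hf', (List.Perm.nodup_iff hp).mp hnd,
      fun u _ => List.not_mem_nil, by simpa using pv_frozen_perm hp⟩

-- ===== VERDICT (by name: the statement is the Claim_ definition above) =====
theorem solution_spec : Claim_equal_solution := by
  intro user_id banned_id _
  unfold Spec_solution solution solution_alt
  have hA := pv_nodup_pvDfs (PySem.List.sorted (pvCandidates user_id banned_id) (fun c => c.length) false)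
    [] PySem.Set.empty PySem.Set.empty List.nodup_nil
  have hB := pv_nodup_levels (pvCandidates user_id banned_id) [[]] (by simp)
  have hperm := (List.perm_ext_iff_of_nodup hA hB).mpr (pv_same_members user_id banned_id)
  dsimp only
  exact_mod_cast hperm.length_eq
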